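-- pv_equiv track=rewrite | github.com/urologi97/Backpropagation-Neural-Network | main.py | Menghitung_Prediksi
-- ===== SOURCE A (Python) =====
-- def Menghitung_Prediksi(Y_test):
--     Prediksi=[]
--     for x in range(len(Y_test)):
--         temp=Y_test[x][0]
--         counter=1
--         for y in range(len(Y_test[0])):
--             if(Y_test[x][y]>temp):
--                 temp=Y_test[x][y]
--                 counter=y+1
--         Prediksi.append(counter)
--     return Prediksi
-- ===== SOURCE B (Python) =====
-- def _argmax(row):
--     # returns (max value, index of its first occurrence) by divide and conquer;
--     # on a tie between halves the left half wins, so the first occurrence is kept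
--     if len(row) <= 1:
--         return (row[0], 0)
--     k = len(row) // 2
--     lv, li = _argmax(row[:k])
--     rv, ri = _argmax(row[k:])
--     return (lv, li) if lv >= rv else (rv, ri + k)
--
-- def Menghitung_Prediksi(Y_test):
--     return [_argmax(row)[1] + 1 for row in Y_test]
-- ===== Notes on version B (the rewrite author's own statement) =====
-- stated objective: alternative
-- what changed: Replaces A's fused left-to-right index scan with a per-row divide-and-conquer argmax (recursively split the row in half and combine, left half winning ties), then map indices to 1-based.
-- outside the precondition, e.g. on Menghitung_Prediksi([[1, 2], [3, 0, 9]]): A returns [2, 1], B returns [2, 3]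
import Mathlib
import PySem

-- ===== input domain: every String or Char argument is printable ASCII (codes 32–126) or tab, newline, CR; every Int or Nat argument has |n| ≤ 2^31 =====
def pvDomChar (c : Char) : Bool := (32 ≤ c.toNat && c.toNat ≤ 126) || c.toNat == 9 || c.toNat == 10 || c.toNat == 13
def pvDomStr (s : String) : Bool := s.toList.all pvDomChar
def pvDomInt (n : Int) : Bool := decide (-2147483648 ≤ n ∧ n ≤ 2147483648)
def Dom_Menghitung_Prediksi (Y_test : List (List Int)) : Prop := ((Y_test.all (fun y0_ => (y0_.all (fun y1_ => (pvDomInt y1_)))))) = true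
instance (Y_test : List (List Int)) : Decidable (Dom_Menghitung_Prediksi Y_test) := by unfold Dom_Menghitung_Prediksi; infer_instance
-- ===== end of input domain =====

-- B replaces A's fused left-to-right argmax scan with a per-row divide-and-conquer argmax
-- (split the row in half, recurse, left half wins ties), objective: alternative algorithm.

-- ===== PORT A =====
def Menghitung_Prediksi (Y_test : List (List Int)) : List Int :=
  (PySem.List.pyRange 0 (Y_test.length : Int) 1).foldl (fun Prediksi x =>
    let row := PySem.List.pyGetD Y_test x []
    let tc := (PySem.List.pyRange 0 ((PySem.List.pyGetD Y_test 0 []).length : Int) 1).foldl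
      (fun (tc : Int × Int) y =>
        if PySem.List.pyGetD row y 0 > tc.1 then (PySem.List.pyGetD row y 0, y + 1) else tc)
      (PySem.List.pyGetD row 0 0, 1)
    Prediksi ++ [tc.2]) []

-- ===== PORT B =====
-- helper of B: (max value, first index of it) by divide and conquer; left half wins ties.
def pvArgmax (row : List Int) : Int × Int :=
  if _h : row.length ≤ 1 then (row.headD 0, 0)
  else
    let k := row.length / 2
    let lres := pvArgmax (row.take k)
    let rres := pvArgmax (row.drop k)
    if lres.1 ≥ rres.1 then lres else (rres.1, rres.2 + (k : Int))
termination_by row.length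
decreasing_by
  · simp only [List.length_take]; omega
  · simp only [List.length_drop]; omega

def Menghitung_Prediksi_alt (Y_test : List (List Int)) : List Int :=
  Y_test.map (fun row => (pvArgmax row).2 + 1)

-- ===== PRECONDITION & SPEC =====
-- Pre_ excludes ragged or empty-row inputs: on a row shorter than the first row (or empty) A raises
-- IndexError, and on a row longer than the first row A silently ignores the tail (an artefact of A
-- iterating range(len(Y_test[0])) for every row) while B scans the whole row.
def Pre_Menghitung_Prediksi (Y_test : List (List Int)) : Prop :=
  ∀ r ∈ Y_test, r ≠ [] ∧ r.length = (Y_test.headD []).length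
instance (Y_test : List (List Int)) : Decidable (Pre_Menghitung_Prediksi Y_test) := by unfold Pre_Menghitung_Prediksi; infer_instance
def pvWitness_Menghitung_Prediksi : List (List Int) := [[1, 2], [3, 0]]

def Spec_Menghitung_Prediksi (Y_test : List (List Int)) (out : List Int) : Prop := out = Menghitung_Prediksi_alt Y_test
instance (Y_test : List (List Int)) (out : List Int) : Decidable (Spec_Menghitung_Prediksi Y_test out) := by unfold Spec_Menghitung_Prediksi; infer_instance

-- ===== CLAIM (what is proved, stated in full; the proofs are below) =====
def Claim_equal_Menghitung_Prediksi : Prop := ∀ (Y_test : List (List Int)), Dom_Menghitung_Prediksi Y_test → Pre_Menghitung_Prediksi Y_test → Spec_Menghitung_Prediksi Y_test (Menghitung_Prediksi Y_test)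

-- ===== LEMMAS AND PROOFS =====

-- The common specification both sides are reduced to: the running max of a nonempty row,
-- and the index of its first occurrence.
def pvM : List Int → Int
  | [] => 0
  | h :: t => t.foldl max h

-- Structural form of A's inner argmax scan: state (temp, counter), s = next index.
def pvAmax (t c s : Int) : List Int → Int × Int
  | [] => (t, c)
  | v :: l => if v > t then pvAmax v (s + 1) (s + 1) l else pvAmax t c (s + 1) l

-- A's inner fold over enumerated elements equals pvAmax.
lemma pvEnumFold_eq_amax (l : List Int) : ∀ (s t c : Int),
    (PySem.List.enumerate l s).foldl
      (fun (tc : Int × Int) (p : Int × Int) => if p.2 > tc.1 then (p.2, p.1 + 1) else tc) (t, c)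
      = pvAmax t c s l := by
  induction l with
  | nil => intro s t c; simp [PySem.List.enumerate_nil, pvAmax]
  | cons v l ih =>
    intro s t c
    simp only [PySem.List.enumerate_cons, List.foldl_cons, pvAmax]
    by_cases h : v > t <;> simp [h, ih]

-- Invariant lemma: pvAmax continues a scan whose processed prefix is `pre`,
-- whose running max is t (first occurring at index k), and relates the result
-- to max-then-first-index over the whole list.
lemma pvAmax_spec (l : List Int) : ∀ (pre : List Int) (t : Int) (k : Nat),
    PySem.List.index? pre t = some k → (∀ y ∈ pre, y ≤ t) →
    pvAmax t ((k : Int) + 1) (pre.length : Int) l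
      = (l.foldl max t, ((PySem.List.index? (pre ++ l) (l.foldl max t)).getD 0 : Int) + 1) := by
  induction l with
  | nil =>
    intro pre t k hk _
    simp only [pvAmax, List.foldl_nil, List.append_nil, hk, Option.getD_some]
  | cons v l ih =>
    intro pre t k hk hle
    have htmem : t ∈ pre := by
      exact (PySem.List.index?_isSome_iff pre t).mp (by rw [hk]; rfl)
    simp only [pvAmax]
    by_cases h : v > t
    · have hvnot : v ∉ pre := fun hv => absurd (hle v hv) (by omega)
      have hk' : PySem.List.index? (pre ++ [v]) v = some pre.length :=
        PySem.List.index?_append_singleton_self pre v hvnot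
      have hle' : ∀ y ∈ pre ++ [v], y ≤ v := by
        intro y hy
        rcases List.mem_append.mp hy with hy | hy
        · exact le_of_lt (lt_of_le_of_lt (hle y hy) h)
        · simp at hy; omega
      have := ih (pre ++ [v]) v pre.length hk' hle'
      simp only [List.length_append, List.length_singleton, List.append_assoc,
        List.singleton_append] at this
      have hmax : max t v = v := by omega
      simp only [h, if_pos, List.foldl_cons, hmax]
      rw [show ((pre.length : Int) + 1) = (((pre.length + 1 : Nat)) : Int) by push_cast; ring] at this ⊢
      convert this using 3
    · have hk' : PySem.List.index? (pre ++ [v]) t = some k := by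
        rw [PySem.List.index?_append_of_mem _ htmem, hk]
      have hle' : ∀ y ∈ pre ++ [v], y ≤ t := by
        intro y hy
        rcases List.mem_append.mp hy with hy | hy
        · exact hle y hy
        · simp at hy; omega
      have := ih (pre ++ [v]) t k hk' hle'
      simp only [List.length_append, List.length_singleton, List.append_assoc,
        List.singleton_append] at this
      have hmax : max t v = t := by omega
      simp only [h, if_neg, List.foldl_cons, hmax, not_false_iff]
      rw [show ((pre.length : Int) + 1) = (((pre.length + 1 : Nat)) : Int) by push_cast; ring]
      exact this

-- foldl max commutes with a max'ed-in initial value.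
lemma pvFoldl_max_max (l : List Int) : ∀ x y : Int, l.foldl max (max x y) = max x (l.foldl max y) := by
  induction l with
  | nil => intro x y; rfl
  | cons a l ih => intro x y; simp only [List.foldl_cons, max_assoc, ih]

-- pvM of an append of nonempty lists is the max of the two pvM's.
lemma pvM_append (a b : List Int) (ha : a ≠ []) (hb : b ≠ []) :
    pvM (a ++ b) = max (pvM a) (pvM b) := by
  cases a with
  | nil => exact absurd rfl ha
  | cons h t =>
    cases b with
    | nil => exact absurd rfl hb
    | cons h' t' =>
      simp only [pvM, List.cons_append, List.foldl_append, List.foldl_cons]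
      rw [show max (t.foldl max h) h' = max (t.foldl max h) h' from rfl]
      calc t'.foldl max (max (t.foldl max h) h')
          = max (t.foldl max h) (t'.foldl max h') := pvFoldl_max_max t' _ h'
_ = _ := rfl

-- pvM l is a member of a nonempty l, and bounds every element.
lemma pvM_mem (l : List Int) (hl : l ≠ []) : pvM l ∈ l := by
  cases l with
  | nil => exact absurd rfl hl
  | cons h t =>
    simp only [pvM]
    rcases PySem.List.foldl_max_mem t h with h1 | h1
    · rw [h1]; exact List.mem_cons_self
    · exact List.mem_cons_of_mem _ h1
lemma pvM_ub (l : List Int) : ∀ y ∈ l, y ≤ pvM l := by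
  cases l with
  | nil => intro y hy; exact absurd hy (List.not_mem_nil)
  | cons h t =>
    intro y hy
    simp only [pvM]
    rcases List.mem_cons.mp hy with rfl | hy
    · exact (PySem.List.le_foldl_max t y).1
    · exact (PySem.List.le_foldl_max t h).2 y hy

-- index? over an append when the value is not in the first part.
lemma pvIndex?_append_not_mem (a : List Int) (b : List Int) (v : Int) (hv : v ∉ a) :
    PySem.List.index? (a ++ b) v = (PySem.List.index? b v).map (· + a.length) := by
  induction a with
  | nil => simp [Option.map_id']
  | cons x a ih =>
    have hx : x ≠ v := fun h => hv (h ▸ List.mem_cons_self)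
    rw [List.cons_append, PySem.List.index?_cons_of_ne _ hx,
      ih (fun h => hv (List.mem_cons_of_mem _ h)), Option.map_map]
    cases PySem.List.index? b v <;> simp

-- Combining two nonempty halves: max and first index of the concatenation.
lemma pvCombine (a b : List Int) (ha : a ≠ []) (hb : b ≠ []) :
    (pvM (a ++ b), ((PySem.List.index? (a ++ b) (pvM (a ++ b))).getD 0 : Int))
      = if pvM a ≥ pvM b
        then (pvM a, ((PySem.List.index? a (pvM a)).getD 0 : Int))
        else (pvM b, ((PySem.List.index? b (pvM b)).getD 0 : Int) + (a.length : Int)) := by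
  by_cases hge : pvM a ≥ pvM b
  · rw [if_pos hge, pvM_append a b ha hb, max_eq_left hge,
      PySem.List.index?_append_of_mem _ (pvM_mem a ha)]
  · have hlt : pvM a < pvM b := by omega
    have hnm : pvM b ∉ a := fun hmem => absurd (pvM_ub a _ hmem) (by omega)
    rw [if_neg hge, pvM_append a b ha hb, max_eq_right (le_of_lt hlt),
      pvIndex?_append_not_mem a b _ hnm]
    obtain ⟨j, hj⟩ : ∃ j, PySem.List.index? b (pvM b) = some j :=
      Option.isSome_iff_exists.mp ((PySem.List.index?_isSome_iff _ _).mpr (pvM_mem b hb))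
    rw [hj]
    simp only [Option.map_some, Option.getD_some]
    norm_cast

-- The divide-and-conquer argmax computes (max, first index of the max).
lemma pvArgmax_spec : ∀ (n : Nat) (l : List Int), l.length = n → l ≠ [] →
    pvArgmax l = (pvM l, ((PySem.List.index? l (pvM l)).getD 0 : Int)) := by
  intro n
  induction n using Nat.strong_induction_on with
  | _ n ih =>
    intro l hn hl
    by_cases h1 : l.length ≤ 1
    · obtain ⟨v, rfl⟩ : ∃ v, l = [v] := by
        cases l with
        | nil => exact absurd rfl hl
        | cons h t => cases t with
          | nil => exact ⟨h, rfl⟩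
          | cons a b => simp at h1
      rw [pvArgmax]
      simp [pvM]
    · rw [pvArgmax]
      simp only [h1, dite_false]
      set k := l.length / 2 with hk
      have hkl : k < l.length := by omega
      have hta : (l.take k).length = k := by simp; omega
      have htb : (l.drop k).length = l.length - k := by simp
      have hane : l.take k ≠ [] := by
        intro h; rw [h] at hta; simp at hta; omega
      have hbne : l.drop k ≠ [] := by
        intro h; rw [h] at htb; simp at htb; omega
      have hA := ih (l.take k).length (by omega) (l.take k) rfl hane
      have hB := ih (l.drop k).length (by omega) (l.drop k) rfl hbne
      have hsplit : l.take k ++ l.drop k = l := List.take_append_drop k l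
      simp only [hA, hB]
      conv_rhs => rw [← hsplit]
      rw [pvCombine _ _ hane hbne, hta]

-- One nonempty row: A's inner scan's counter equals B's divide-and-conquer index + 1.
lemma pvRow_eq (r0 : Int) (rest : List Int) :
    ((PySem.List.pyRange 0 (((r0 :: rest).length : Int)) 1).foldl
      (fun (tc : Int × Int) y =>
        if PySem.List.pyGetD (r0 :: rest) y 0 > tc.1
        then (PySem.List.pyGetD (r0 :: rest) y 0, y + 1) else tc)
      (PySem.List.pyGetD (r0 :: rest) 0 0, 1)).2
      = (pvArgmax (r0 :: rest)).2 + 1 := by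
  have hfold :
      (PySem.List.pyRange 0 (((r0 :: rest).length : Int)) 1).foldl
        (fun (tc : Int × Int) y =>
          if PySem.List.pyGetD (r0 :: rest) y 0 > tc.1
          then (PySem.List.pyGetD (r0 :: rest) y 0, y + 1) else tc)
        (PySem.List.pyGetD (r0 :: rest) 0 0, 1)
      = (PySem.List.enumerate (r0 :: rest) 0).foldl
          (fun (tc : Int × Int) (p : Int × Int) => if p.2 > tc.1 then (p.2, p.1 + 1) else tc)
          (PySem.List.pyGetD (r0 :: rest) 0 0, 1) := by
    rw [PySem.List.enumerate_eq_map_pyRange (d := 0), List.foldl_map]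
    simp [PySem.List.len_eq]
  rw [hfold, PySem.List.pyGetD_zero_cons, pvEnumFold_eq_amax]
  -- first step of the scan is a no-op (r0 > r0 is false)
  have h0 : pvAmax r0 1 0 (r0 :: rest) = pvAmax r0 1 1 rest := by
    simp [pvAmax]
  rw [h0]
  have hA := pvAmax_spec rest [r0] r0 0 (PySem.List.index?_cons_self r0 []) (by simp)
  simp only [List.length_singleton, List.singleton_append, Nat.cast_zero, zero_add,
    Nat.cast_one] at hA
  rw [hA, pvArgmax_spec (r0 :: rest).length _ rfl (by simp)]
  rfl

theorem Menghitung_Prediksi_spec : Claim_equal_Menghitung_Prediksi := by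
  unfold Claim_equal_Menghitung_Prediksi
  intro Y_test _ hpre
  unfold Spec_Menghitung_Prediksi Menghitung_Prediksi Menghitung_Prediksi_alt
  rw [PySem.List.foldl_pyRange_zero_pyGetD' Y_test []
    (fun (Prediksi : List Int) (row : List Int) =>
      Prediksi ++ [((PySem.List.pyRange 0 ((PySem.List.pyGetD Y_test 0 []).length : Int) 1).foldl
        (fun (tc : Int × Int) y =>
          if PySem.List.pyGetD row y 0 > tc.1 then (PySem.List.pyGetD row y 0, y + 1) else tc)
        (PySem.List.pyGetD row 0 0, 1)).2] ) []]
  rw [PySem.List.foldl_append_singleton_eq_map]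
  refine List.map_congr_left ?_
  intro row hrow
  obtain ⟨hne, hlen⟩ := hpre row hrow
  have hY : Y_test ≠ [] := by intro h; subst h; exact absurd hrow (List.not_mem_nil)
  have h0 : (PySem.List.pyGetD Y_test 0 []).length = row.length := by
    rw [PySem.List.pyGetD_zero, hlen]
    cases Y_test with
    | nil => exact absurd rfl hY
    | cons h t => rfl
  rw [h0]
  cases row with
  | nil => exact absurd rfl hne
  | cons r0 rest => exact pvRow_eq r0 rest
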